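-- pv_equiv track=rewrite | github.com/killmaciek124/Python-College | LAB7/ZAD5.py | check
-- ===== SOURCE A (Python) =====
-- def check(list, x):
--     ListOfX = []
--     ListofBigger = []
--     ListofSmaller = []
--     n = len(list)-1
--     while n >= 0:
--         if list[n] == x:
--             ListOfX.append(list[n])
--         elif list[n] < x:
--             ListofSmaller.append(list[n])
--         else:
--             ListofBigger.append(list[n])
--         n -=1
--     return len(ListOfX), len(ListofSmaller), len(ListofBigger)
-- ===== SOURCE B (Python) =====
-- def check(list, x):
--     equal = list.count(x)
--     smaller = sum(1 for e in list if e < x)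
--     return equal, smaller, len(list) - equal - smaller
-- ===== Notes on version B (the rewrite author's own statement) =====
-- stated objective: simpler
-- what changed: Replaces the backward while-loop that three-way classifies each element into three accumulator lists (returning their lengths) with two focused counting scans (list.count for equals, a generator-sum for smaller) and derives the larger count arithmetically as len - equal - smaller. (the counting scans run in C via list.count/sum instead of a Python-level loop appending to lists)
import Mathlib
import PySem

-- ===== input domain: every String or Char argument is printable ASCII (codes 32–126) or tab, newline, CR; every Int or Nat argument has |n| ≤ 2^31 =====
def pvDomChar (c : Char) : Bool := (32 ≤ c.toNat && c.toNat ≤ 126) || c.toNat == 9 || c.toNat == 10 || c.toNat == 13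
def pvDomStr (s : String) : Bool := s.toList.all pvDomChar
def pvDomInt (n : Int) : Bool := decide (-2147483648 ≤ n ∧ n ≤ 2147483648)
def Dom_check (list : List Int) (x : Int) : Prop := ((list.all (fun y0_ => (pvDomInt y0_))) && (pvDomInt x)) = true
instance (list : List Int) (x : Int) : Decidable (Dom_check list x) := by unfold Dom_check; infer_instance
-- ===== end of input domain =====

-- B replaces A's backward three-way classification into three accumulator lists by two counting
-- scans (count of equals, sum of smaller) and derives the third count arithmetically (simpler).

-- ===== PORT A =====
-- the while loop, indexing from n = len-1 down to 0; fuel k means "current index is k-1"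
def checkAux (l : List Int) (x : Int) : Nat → List Int → List Int → List Int → List Int × List Int × List Int
  | 0, lx, ls, lb => (lx, ls, lb)
  | k+1, lx, ls, lb =>
    let e := l.getD k 0
    if e = x then checkAux l x k (lx ++ [e]) ls lb
    else if e < x then checkAux l x k lx (ls ++ [e]) lb
    else checkAux l x k lx ls (lb ++ [e])

def check (list : List Int) (x : Int) : Int × Int × Int :=
  let r := checkAux list x list.length [] [] []
  ((r.1.length : Int), (r.2.1.length : Int), (r.2.2.length : Int))

-- ===== PORT B =====
def check_alt (list : List Int) (x : Int) : Int × Int × Int :=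
  let equal : Int := (PySem.List.count list x : Int)
  let smaller : Int := list.foldl (fun acc e => if e < x then acc + 1 else acc) 0
  (equal, smaller, (list.length : Int) - equal - smaller)

-- ===== PRECONDITION & SPEC =====
def Spec_check (list : List Int) (x : Int) (out : Int × Int × Int) : Prop := out = check_alt list x
instance (list : List Int) (x : Int) (out : Int × Int × Int) : Decidable (Spec_check list x out) := by unfold Spec_check; infer_instance

-- ===== CLAIM (what is proved, stated in full; the proofs are below) =====
def Claim_equal_check : Prop := ∀ (list : List Int) (x : Int), Dom_check list x → Spec_check list x (check list x)

-- ===== LEMMAS AND PROOFS =====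

-- loop invariant: after consuming fuel k (indices k-1 … 0) the three accumulators have grown by
-- the respective counts over the first k elements of l
theorem checkAux_lengths (l : List Int) (x : Int) :
    ∀ (k : Nat), k ≤ l.length → ∀ (lx ls lb : List Int),
      (checkAux l x k lx ls lb).1.length = lx.length + (l.take k).countP (fun e => e == x) ∧
      (checkAux l x k lx ls lb).2.1.length = ls.length + (l.take k).countP (fun e => decide (e < x)) ∧
      (checkAux l x k lx ls lb).2.2.length = lb.length + (l.take k).countP (fun e => decide (x < e)) := by
  intro k
  induction k with
  | zero => intro _ lx ls lb; simp [checkAux]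
  | succ k ih =>
    intro hk lx ls lb
    have hklt : k < l.length := Nat.lt_of_succ_le hk
    have htake : l.take (k+1) = l.take k ++ [l[k]] := by
      rw [List.take_succ]; simp [List.getElem?_eq_getElem hklt]
    have hgetD : l.getD k 0 = l[k] := by simp [List.getD_eq_getElem?_getD, List.getElem?_eq_getElem hklt]
    have ih' := ih (Nat.le_of_lt hklt)
    simp only [checkAux, hgetD, htake, List.countP_append, List.countP_cons, List.countP_nil]
    by_cases h1 : l[k] = x
    · rw [if_pos h1]
      obtain ⟨a, b, c⟩ := ih' (lx ++ [l[k]]) ls lb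
      refine ⟨?_, ?_, ?_⟩ <;> [rw [a]; rw [b]; rw [c]] <;> simp [h1] <;> omega
    · rw [if_neg h1]
      by_cases h2 : l[k] < x
      · rw [if_pos h2]
        obtain ⟨a, b, c⟩ := ih' lx (ls ++ [l[k]]) lb
        refine ⟨?_, ?_, ?_⟩ <;> [rw [a]; rw [b]; rw [c]] <;>
          simp [h1, h2, not_lt.mpr (le_of_lt h2)] <;> omega
      · rw [if_neg h2]
        have h3 : x < l[k] := lt_of_le_of_ne (not_lt.mp h2) (Ne.symm h1)
        obtain ⟨a, b, c⟩ := ih' lx ls (lb ++ [l[k]])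
        refine ⟨?_, ?_, ?_⟩ <;> [rw [a]; rw [b]; rw [c]] <;>
          simp [h1, h2, h3] <;> omega

-- the three counts partition the list
theorem countP_partition (l : List Int) (x : Int) :
    l.countP (fun e => e == x) + l.countP (fun e => decide (e < x)) + l.countP (fun e => decide (x < e)) = l.length := by
  induction l with
  | nil => simp
  | cons a t ih =>
    simp only [List.countP_cons, List.length_cons]
    rcases lt_trichotomy a x with h | h | h
    · simp [h, ne_of_lt h, not_lt.mpr (le_of_lt h)]; omega
    · simp [h]; omega
    · simp [h, (ne_of_gt h), not_lt.mpr (le_of_lt h)]; omega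

-- ===== VERDICT (by name: the statement is the Claim_ definition above) =====
theorem check_spec : Claim_equal_check := by
  intro l x _
  unfold Spec_check check check_alt
  obtain ⟨a, b, c⟩ := checkAux_lengths l x l.length (le_refl _) [] [] []
  simp only [List.take_length, List.length_nil, Nat.zero_add] at a b c
  have hsum : l.foldl (fun acc e => if e < x then acc + 1 else acc) (0 : Int)
      = (l.countP (fun e => decide (e < x)) : Int) := by
    rw [PySem.List.foldl_ite_add_one]; simp
  have hcnt : PySem.List.count l x = l.countP (fun e => e == x) := by
    simp [PySem.List.count_eq, List.count]
  have hpart := countP_partition l x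
  simp only [a, b, c, hsum, hcnt, Prod.mk.injEq]
  refine ⟨trivial, trivial, ?_⟩
  omega
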